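-- pv_equiv track=rewrite | github.com/alboro/audiobook_creator | audiobook_generator/utils/chunk_boundaries.py | merge_broken_backtick_sentences
-- ===== SOURCE A (Python) =====
-- def merge_broken_backtick_sentences(sentences: list[str]) -> list[str]:
--     """Re-attach a stray closing backtick that sentencex may put in the next chunk."""
--     if len(sentences) < 2:
--         return sentences
--     result: list[str] = []
--     i = 0
--     while i < len(sentences):
--         sent = sentences[i]
--         next_sent = sentences[i + 1] if i + 1 < len(sentences) else None
--         if (
--             next_sent is not None
--             and sent.count("`") % 2 == 1
--             and next_sent.startswith("`")
--             and (len(next_sent) == 1 or next_sent[1] in (" ", "\t", "\n"))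
--         ):
--             result.append(sent + "`")
--             rest = next_sent[1:].lstrip()
--             if rest:
--                 result.append(rest)
--             i += 2
--         else:
--             result.append(sent)
--             i += 1
--     return result
-- ===== SOURCE B (Python) =====
-- def merge_broken_backtick_sentences(sentences: list[str]) -> list[str]:
--     """Two staged passes instead of one merging loop: first label every sentence
--     'S' (starts a merge), 'C' (consumed right partner) or 'K' (kept as is); then
--     map each labelled sentence to its 0/1/1 output pieces and flatten."""
--     n = len(sentences)
--     flags: list[str] = []
--     consumed_next = False
--     for i, sent in enumerate(sentences):
--         if consumed_next:
--             flags.append('C')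
--             consumed_next = False
--         elif (i + 1 < n and sent.count('`') % 2 == 1
--               and sentences[i + 1].startswith('`')
--               and (len(sentences[i + 1]) == 1
--                    or sentences[i + 1][1] in (' ', '\t', '\n'))):
--             flags.append('S')
--             consumed_next = True
--         else:
--             flags.append('K')
--     pieces: list[list[str]] = []
--     for sent, f in zip(sentences, flags):
--         if f == 'S':
--             pieces.append([sent + '`'])
--         elif f == 'C':
--             rest = sent[1:].lstrip()
--             pieces.append([rest] if rest else [])
--         else:
--             pieces.append([sent])
--     return [p for ps in pieces for p in ps]
-- ===== Notes on version B (the rewrite author's own statement) =====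
-- stated objective: alternative
-- what changed: Replaces A's single merging while-loop with lookahead and i+=2 skips by two staged passes: a labelling pass that tags each sentence S/C/K, then an independent per-sentence expansion pass (each tag mapped to its 0 or 1 output pieces) that is flattened into the result.
import Mathlib
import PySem

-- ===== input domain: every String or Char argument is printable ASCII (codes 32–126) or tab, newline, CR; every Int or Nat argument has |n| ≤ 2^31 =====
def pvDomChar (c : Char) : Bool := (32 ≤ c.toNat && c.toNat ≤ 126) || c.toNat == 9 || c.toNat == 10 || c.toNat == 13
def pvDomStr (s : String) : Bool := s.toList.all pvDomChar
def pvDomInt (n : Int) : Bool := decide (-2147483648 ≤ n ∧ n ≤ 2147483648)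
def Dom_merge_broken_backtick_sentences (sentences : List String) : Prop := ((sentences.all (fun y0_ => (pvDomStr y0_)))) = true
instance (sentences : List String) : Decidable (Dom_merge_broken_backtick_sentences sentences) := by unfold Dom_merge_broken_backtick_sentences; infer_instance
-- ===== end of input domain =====

-- B replaces A's single merging while-loop (lookahead, i += 2 skips) by two staged passes:
-- label every sentence S/C/K, then expand each labelled sentence independently and flatten.

-- ===== PORT A =====
-- sent.count("`") % 2 == 1
def pvTickOdd (s : String) : Bool := PySem.Str.count s "`" % 2 == 1
-- next_sent.startswith("`") and (len(next_sent) == 1 or next_sent[1] in (" ", "\t", "\n"))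
def pvStartsCond (s : String) : Bool :=
  PySem.Str.startswith s "`" &&
    (PySem.Str.len s == 1 ||
      (PySem.Str.pyGet? s 1 == some ' ' || PySem.Str.pyGet? s 1 == some '\t' ||
        PySem.Str.pyGet? s 1 == some '\n'))
-- next_sent[1:].lstrip()
def pvRestOf (t : String) : String := PySem.Str.lstrip (PySem.Str.slice t (some 1) none)

-- A's while-loop: index i over sentences = structural recursion on the suffix;
-- a merge consumes two sentences (i += 2), otherwise one (i += 1)
def pvLoopA : List String → List String
  | [] => []
  | [s] => [s]
  | s :: t :: rest =>
    if pvTickOdd s && pvStartsCond t then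
      let r := pvRestOf t
      if r ≠ "" then (s ++ "`") :: r :: pvLoopA rest else (s ++ "`") :: pvLoopA rest
    else s :: pvLoopA (t :: rest)

def merge_broken_backtick_sentences (sentences : List String) : List String :=
  if sentences.length < 2 then sentences else pvLoopA sentences

-- ===== PORT B =====
-- Stage 1 (the for-loop over enumerate with the consumed_next flag): labels for the
-- suffix; the Bool is consumed_next, the lookahead sentences[i+1] is the next element.
def pvLabels : Bool → List String → List String
  | _, [] => []
  | true, _ :: rest => "C" :: pvLabels false rest
  | false, [_] => ["K"]
  | false, s :: t :: rest =>
    if pvTickOdd s && pvStartsCond t then "S" :: pvLabels true (t :: rest)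
    else "K" :: pvLabels false (t :: rest)

-- Stage 2 body: the pieces a labelled sentence contributes
def pvPiece (s f : String) : List String :=
  if f == "S" then [s ++ "`"]
  else if f == "C" then (let r := pvRestOf s; if r ≠ "" then [r] else [])
  else [s]

def merge_broken_backtick_sentences_alt (sentences : List String) : List String :=
  (((sentences.zip (pvLabels false sentences)).map (fun p => pvPiece p.1 p.2))).flatten

-- ===== PRECONDITION & SPEC =====
def Spec_merge_broken_backtick_sentences (sentences : List String) (out : List String) : Prop := out = merge_broken_backtick_sentences_alt sentences
instance (sentences : List String) (out : List String) : Decidable (Spec_merge_broken_backtick_sentences sentences out) := by unfold Spec_merge_broken_backtick_sentences; infer_instance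

-- ===== CLAIM (what is proved, stated in full; the proofs are below) =====
def Claim_equal_merge_broken_backtick_sentences : Prop := ∀ (sentences : List String), Dom_merge_broken_backtick_sentences sentences → Spec_merge_broken_backtick_sentences sentences (merge_broken_backtick_sentences sentences)

-- ===== LEMMAS AND PROOFS =====

-- B's two staged passes compute A's merging loop
theorem pvAltEqLoop (l : List String) :
    merge_broken_backtick_sentences_alt l = pvLoopA l := by
  unfold merge_broken_backtick_sentences_alt
  match l with
  | [] => rfl
  | [s] => rfl
  | s :: t :: rest =>
    by_cases hc : (pvTickOdd s && pvStartsCond t) = true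
    · have hlab : pvLabels false (s :: t :: rest) = "S" :: "C" :: pvLabels false rest := by
        simp [pvLabels, hc]
      rw [hlab]
      have ih := pvAltEqLoop rest
      unfold merge_broken_backtick_sentences_alt at ih
      simp only [List.zip_cons_cons, List.map_cons, List.flatten_cons, ih]
      simp only [pvLoopA]
      rw [if_pos hc]
      by_cases hr : pvRestOf t ≠ ""
      · simp [pvPiece, hr]
      · simp [pvPiece, hr]
    · have hlab : pvLabels false (s :: t :: rest) = "K" :: pvLabels false (t :: rest) := by
        simp [pvLabels, hc]
      rw [hlab]
      have ih := pvAltEqLoop (t :: rest)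
      unfold merge_broken_backtick_sentences_alt at ih
      simp only [List.zip_cons_cons, List.map_cons, List.flatten_cons, ih]
      simp only [pvLoopA]
      rw [if_neg hc]
      simp [pvPiece]
termination_by l.length

-- ===== VERDICT (by name: the statement is the Claim_ definition above) =====
theorem merge_broken_backtick_sentences_spec : Claim_equal_merge_broken_backtick_sentences := by
  intro sentences _
  unfold Spec_merge_broken_backtick_sentences merge_broken_backtick_sentences
  rw [pvAltEqLoop]
  split
  · match sentences with
    | [] => rfl
    | [s] => rfl
    | s :: t :: rest => simp at *
  · rfl
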